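-- pv_equiv track=rewrite | github.com/dream201188/algorithm017 | src/tmp_submit/重复数字里面找索引.py | get_repeat
-- ===== SOURCE A (Python) =====
-- def get_repeat(nums):
--     start_index, count = -1, 1
--     for i in range(len(nums) - 1):
--         if nums[i + 1] == nums[i]:
--             if start_index == -1:
--                 start_index = i
--             count += 1
--     return start_index, count
-- ===== SOURCE B (Python) =====
-- def get_repeat(nums):
--     # Divide and conquer: solve halves, then merge with the one boundary pair.
--     def solve(lo, hi):
--         if hi - lo < 2:
--             return (-1, 1)
--         mid = (lo + hi) // 2
--         sL, cL = solve(lo, mid)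
--         sR, cR = solve(mid, hi)
--         cnt = cL + cR - 1
--         start = sL
--         if nums[mid - 1] == nums[mid]:
--             cnt += 1
--             if start == -1:
--                 start = mid - 1
--         if start == -1:
--             start = sR
--         return (start, cnt)
--     return solve(0, len(nums))
-- ===== Notes on version B (the rewrite author's own statement) =====
-- stated objective: alternative
-- what changed: B replaces A's single left-to-right accumulator loop with a divide-and-conquer recursion: it solves the two halves of the index window independently and merges their (start, count) results with the single boundary pair, instead of folding state over an index loop.
import Mathlib
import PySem

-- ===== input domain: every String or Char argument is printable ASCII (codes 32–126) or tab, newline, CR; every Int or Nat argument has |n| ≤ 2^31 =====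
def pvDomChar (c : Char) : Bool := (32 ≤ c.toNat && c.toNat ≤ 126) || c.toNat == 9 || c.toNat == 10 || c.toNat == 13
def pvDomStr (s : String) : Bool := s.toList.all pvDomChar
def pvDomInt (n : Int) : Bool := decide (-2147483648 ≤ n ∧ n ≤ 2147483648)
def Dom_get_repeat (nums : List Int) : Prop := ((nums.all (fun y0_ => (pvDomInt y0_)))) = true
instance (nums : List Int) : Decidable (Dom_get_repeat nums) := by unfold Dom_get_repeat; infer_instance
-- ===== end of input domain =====

-- B replaces A's single accumulator loop with a divide-and-conquer recursion that merges
-- the (start, count) answers of the two halves with the one boundary pair (objective: alternative).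

-- ===== PORT A =====
-- for i in range(len(nums)-1): if nums[i+1]==nums[i]: …   (indices always in range, so pyGetD is exact)
def get_repeat (nums : List Int) : Int × Int :=
  (PySem.List.pyRange 0 ((nums.length : Int) - 1) 1).foldl
    (fun (st : Int × Int) i =>
      if PySem.List.pyGetD nums (i + 1) 0 = PySem.List.pyGetD nums i 0 then
        ((if st.1 = -1 then i else st.1), st.2 + 1)
      else st)
    (-1, 1)

-- ===== PORT B =====
-- def solve(lo, hi): … ; return solve(0, len(nums))   (divide and conquer on the index window)
def pvSolve (nums : List Int) (lo hi : Int) : Int × Int :=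
  if hlt : hi - lo < 2 then (-1, 1)
  else
    let mid := PySem.Int.floordiv (lo + hi) 2
    let L := pvSolve nums lo mid
    let R := pvSolve nums mid hi
    let cnt := L.2 + R.2 - 1
    let sc :=
      if PySem.List.pyGetD nums (mid - 1) 0 = PySem.List.pyGetD nums mid 0 then
        ((if L.1 = -1 then mid - 1 else L.1), cnt + 1)
      else (L.1, cnt)
    ((if sc.1 = -1 then R.1 else sc.1), sc.2)
termination_by (hi - lo).toNat
decreasing_by
  · have h := PySem.Int.floordiv_two_mid_bounds (lo := lo) (hi := hi) (by omega)
    have h2 : PySem.Int.floordiv (lo + hi) 2 = (lo + hi) / 2 :=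
      PySem.Int.floordiv_eq_ediv_of_pos (by omega)
    omega
  · have h := PySem.Int.floordiv_two_mid_bounds (lo := lo) (hi := hi) (by omega)
    have h2 : PySem.Int.floordiv (lo + hi) 2 = (lo + hi) / 2 :=
      PySem.Int.floordiv_eq_ediv_of_pos (by omega)
    omega

def get_repeat_alt (nums : List Int) : Int × Int :=
  pvSolve nums 0 (nums.length : Int)

-- ===== PRECONDITION & SPEC =====
def Spec_get_repeat (nums : List Int) (out : Int × Int) : Prop := out = get_repeat_alt nums
instance (nums : List Int) (out : Int × Int) : Decidable (Spec_get_repeat nums out) := by unfold Spec_get_repeat; infer_instance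

-- ===== CLAIM (what is proved, stated in full; the proofs are below) =====
def Claim_equal_get_repeat : Prop := ∀ (nums : List Int), Dom_get_repeat nums → Spec_get_repeat nums (get_repeat nums)

-- ===== LEMMAS AND PROOFS =====

-- the adjacent-duplicate predicate shared by both characterisations
def pvP (nums : List Int) (i : Int) : Bool :=
  PySem.List.pyGetD nums (i + 1) 0 == PySem.List.pyGetD nums i 0

-- the duplicate indices inside the window [lo, hi)
def pvW (nums : List Int) (lo hi : Int) : List Int :=
  (PySem.List.pyRange lo (hi - 1) 1).filter (pvP nums)

theorem pvW_mem_nonneg (nums : List Int) (lo hi x : Int) (hlo : 0 ≤ lo)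
    (hx : x ∈ pvW nums lo hi) : 0 ≤ x := by
  have := (PySem.List.mem_pyRange_one).1 (List.mem_of_mem_filter hx)
  omega

-- B's recursion computes (first duplicate index in the window or -1, count + 1)
theorem pvSolve_eq (nums : List Int) (lo hi : Int) (hlo : 0 ≤ lo) :
    pvSolve nums lo hi = ((pvW nums lo hi).headD (-1), ((pvW nums lo hi).length : Int) + 1) := by
  rw [pvSolve]
  by_cases hlt : hi - lo < 2
  · rw [dif_pos hlt]
    have : pvW nums lo hi = [] := by
      unfold pvW
      rw [PySem.List.pyRange_one_eq_nil (by omega)]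
      rfl
    simp [this]
  · rw [dif_neg hlt]
    have h2 : PySem.Int.floordiv (lo + hi) 2 = (lo + hi) / 2 :=
      PySem.Int.floordiv_eq_ediv_of_pos (by omega)
    have hlomid : lo < PySem.Int.floordiv (lo + hi) 2 := by omega
    have hmidhi : PySem.Int.floordiv (lo + hi) 2 < hi := by omega
    have ihL := pvSolve_eq nums lo (PySem.Int.floordiv (lo + hi) 2) hlo
    have ihR := pvSolve_eq nums (PySem.Int.floordiv (lo + hi) 2) hi (by omega)
    simp only [ihL, ihR]
    set mid := PySem.Int.floordiv (lo + hi) 2 with hm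
    -- the boundary condition of B, as the window predicate at mid - 1
    have hiff : pvP nums (mid - 1) = true ↔
        PySem.List.pyGetD nums (mid - 1) 0 = PySem.List.pyGetD nums mid 0 := by
      unfold pvP
      rw [show mid - 1 + 1 = mid by omega, beq_iff_eq]
      exact eq_comm
    -- split the window at the boundary pair (mid - 1, mid)
    have hcons : (PySem.List.pyRange (mid - 1) (hi - 1) 1).filter (pvP nums) =
        (if pvP nums (mid - 1) then [mid - 1] else []) ++ pvW nums mid hi := by
      rw [PySem.List.pyRange_one_cons (by omega), List.filter_cons]
      by_cases hb : pvP nums (mid - 1) <;> simp [hb, pvW]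
    have hsplit : pvW nums lo hi =
        pvW nums lo mid ++ ((if pvP nums (mid - 1) then [mid - 1] else []) ++ pvW nums mid hi) := by
      unfold pvW
      rw [PySem.List.pyRange_one_append lo (mid - 1) (hi - 1) (by omega) (by omega),
          List.filter_append, hcons]
      rfl
    rw [hsplit]
    have hWLnn : ∀ x ∈ pvW nums lo mid, 0 ≤ x := fun x hx => pvW_mem_nonneg nums lo mid x hlo hx
    have hWRnn : ∀ x ∈ pvW nums mid hi, 0 ≤ x :=
      fun x hx => pvW_mem_nonneg nums mid hi x (by omega) hx
    by_cases hb : PySem.List.pyGetD nums (mid - 1) 0 = PySem.List.pyGetD nums mid 0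
    · have hP : pvP nums (mid - 1) = true := hiff.2 hb
      rw [if_pos hb, hP, if_pos rfl]
      cases hWL : pvW nums lo mid with
      | cons a as =>
        have ha : ¬ (a = -1) := by
          have := hWLnn a (by rw [hWL]; exact List.mem_cons_self)
          omega
        simp only [Prod.mk.injEq]; refine ⟨?_, ?_⟩
        · simp [ha]
        · simp only [List.length_append, List.length_cons, List.length_nil]
          push_cast
          ring
      | nil =>
        have hm1 : ¬ (mid - 1 = -1) := by omega
        simp only [Prod.mk.injEq]; refine ⟨?_, ?_⟩
        · simp [hm1]
        · simp only [List.length_append, List.length_cons, List.length_nil]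
          push_cast
          ring
    · have hP : pvP nums (mid - 1) = false := by
        cases h : pvP nums (mid - 1) with
        | true => exact absurd (hiff.1 h) hb
        | false => rfl
      rw [if_neg hb, hP]
      simp only [Bool.false_eq_true, if_false, List.nil_append]
      cases hWL : pvW nums lo mid with
      | cons a as =>
        have ha : ¬ (a = -1) := by
          have := hWLnn a (by rw [hWL]; exact List.mem_cons_self)
          omega
        simp only [Prod.mk.injEq]; refine ⟨?_, ?_⟩
        · simp [ha]
        · simp only [List.length_append, List.length_cons]
          push_cast
          ring
      | nil =>
        simp only [Prod.mk.injEq]; refine ⟨?_, ?_⟩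
        · simp
        · simp only [List.nil_append, List.length_nil]
          push_cast
          ring
termination_by (hi - lo).toNat
decreasing_by
  · have h2 := PySem.Int.floordiv_eq_ediv_of_pos (a := lo + hi) (b := 2) (by omega)
    omega
  · have h2 := PySem.Int.floordiv_eq_ediv_of_pos (a := lo + hi) (b := 2) (by omega)
    omega

-- A's fold over any list of nonnegative indices, characterised by filter
theorem pvFold_eq (nums : List Int) (L : List Int) (hL : ∀ x ∈ L, 0 ≤ x) (s c : Int) :
    L.foldl
      (fun (st : Int × Int) i =>
        if PySem.List.pyGetD nums (i + 1) 0 = PySem.List.pyGetD nums i 0 then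
          ((if st.1 = -1 then i else st.1), st.2 + 1)
        else st) (s, c) =
    ((if s = -1 then (L.filter (pvP nums)).headD (-1) else s),
     c + ((L.filter (pvP nums)).length : Int)) := by
  induction L generalizing s c with
  | nil =>
    simp only [List.foldl_nil, List.filter_nil, List.headD_nil, List.length_nil, Nat.cast_zero,
      add_zero]
    by_cases hs : s = -1 <;> simp [hs]
  | cons a as ih =>
    have ha : 0 ≤ a := hL a List.mem_cons_self
    have has : ∀ x ∈ as, 0 ≤ x := fun x hx => hL x (List.mem_cons_of_mem a hx)
    simp only [List.foldl_cons, List.filter_cons]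
    by_cases hab : PySem.List.pyGetD nums (a + 1) 0 = PySem.List.pyGetD nums a 0
    · have hb : pvP nums a = true := by simp [pvP, hab]
      simp only [hb, if_true, if_pos hab]
      by_cases hs : s = -1
      · rw [if_pos hs, ih has a (c + 1)]
        have ha' : ¬ (a = -1) := by omega
        simp only [Prod.mk.injEq]; refine ⟨?_, ?_⟩
        · simp [ha', hs]
        · simp only [List.length_cons]
          push_cast
          ring
      · rw [if_neg hs, ih has s (c + 1)]
        simp only [Prod.mk.injEq]; refine ⟨?_, ?_⟩
        · simp [hs]
        · simp only [List.length_cons]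
          push_cast
          ring
    · have hb : pvP nums a = false := by simp [pvP, hab]
      simp only [hb, Bool.false_eq_true, if_false, if_neg hab]
      exact ih has s c

theorem pv_main (nums : List Int) : get_repeat nums = get_repeat_alt nums := by
  unfold get_repeat get_repeat_alt
  rw [pvSolve_eq nums 0 (nums.length : Int) le_rfl]
  rw [pvFold_eq nums _ (fun x hx => ((PySem.List.mem_pyRange_one).1 hx).1) (-1) 1]
  unfold pvW
  simp only [Prod.mk.injEq]; refine ⟨?_, ?_⟩
  · simp
  · ring

-- ===== VERDICT (by name: the statement is the Claim_ definition above) =====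
theorem get_repeat_spec : Claim_equal_get_repeat := by
  intro nums _
  unfold Spec_get_repeat
  exact pv_main nums
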